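-- pv_equiv track=rewrite | github.com/pablo90ar/EIO-TP3-Pablo-Funes | src/TableMerger.py | _is_in_rowspan
-- ===== SOURCE A (Python) =====
-- def _is_in_rowspan(y, x, rowspan):
--     rowspan_value = 0
--     row_i = 0
--     for i in range(y):
--         if (i, x) in rowspan.keys():
--             rowspan_value = rowspan[(i, x)]
--             row_i = i
--     if rowspan_value - (y - row_i) > 0:
--         return True
--     else:
--         return False
-- ===== SOURCE B (Python) =====
-- def _is_in_rowspan(y, x, rowspan):
--     best = None  # (row index, stored rowspan value) of the lowest covering entry in column x above row y
--     for (i, xi), v in rowspan.items():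
--         if xi == x and 0 <= i < y and (best is None or i > best[0]):
--             best = (i, v)
--     row_i, rowspan_value = best if best is not None else (0, 0)
--     return rowspan_value - (y - row_i) > 0
-- ===== Notes on version B (the rewrite author's own statement) =====
-- stated objective: faster
-- what changed: B makes a single filtered scan over the sparse dict's items, tracking the maximal matching row index, instead of probing every row index in range(y) for membership.
import Mathlib
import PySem

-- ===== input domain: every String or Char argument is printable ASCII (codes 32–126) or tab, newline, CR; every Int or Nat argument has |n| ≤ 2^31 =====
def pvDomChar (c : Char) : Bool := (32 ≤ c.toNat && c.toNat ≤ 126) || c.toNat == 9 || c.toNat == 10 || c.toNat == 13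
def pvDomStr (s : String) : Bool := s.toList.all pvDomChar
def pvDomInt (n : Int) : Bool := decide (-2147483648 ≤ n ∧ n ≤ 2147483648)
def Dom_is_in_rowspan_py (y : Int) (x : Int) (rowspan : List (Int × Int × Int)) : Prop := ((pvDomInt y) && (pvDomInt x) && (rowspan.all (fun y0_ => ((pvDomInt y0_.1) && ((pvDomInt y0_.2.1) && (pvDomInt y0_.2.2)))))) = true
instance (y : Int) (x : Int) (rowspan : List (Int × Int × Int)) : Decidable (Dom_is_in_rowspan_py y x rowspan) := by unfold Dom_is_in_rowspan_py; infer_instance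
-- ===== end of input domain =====

-- B replaces A's per-row membership probe of range(y) by a single filtered scan of the
-- dict's items tracking the maximal matching row index (objective: faster on large y).

-- ===== PORT A =====
-- '(i, x) in rowspan.keys()' / 'rowspan[(i, x)]': first entry with key (i, x) (dict convention)
def pvLookup (l : List (Int × Int × Int)) (i x : Int) : Option Int :=
  match l with
  | [] => none
  | e :: t => if e.1 = i ∧ e.2.1 = x then some e.2.2 else pvLookup t i x

def is_in_rowspan_py (y : Int) (x : Int) (rowspan : List (Int × Int × Int)) : Bool :=
  let st := (PySem.List.pyRange 0 y 1).foldl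
    (fun (s : Int × Int) i =>
      match pvLookup rowspan i x with
      | some v => (v, i)          -- rowspan_value := rowspan[(i,x)]; row_i := i
      | none => s) (0, 0)
  decide (st.1 - (y - st.2) > 0)

-- ===== PORT B =====
def is_in_rowspan_py_alt (y : Int) (x : Int) (rowspan : List (Int × Int × Int)) : Bool :=
  let best := rowspan.foldl
    (fun (b : Option (Int × Int)) e =>
      if decide (e.2.1 = x) && decide (0 ≤ e.1) && decide (e.1 < y)
          && b.all (fun p => decide (p.1 < e.1))
      then some (e.1, e.2.2) else b) none
  match best with
  | some p => decide (p.2 - (y - p.1) > 0)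
  | none => decide ((0 : Int) - (y - 0) > 0)

-- ===== PRECONDITION & SPEC =====
def Spec_is_in_rowspan_py (y : Int) (x : Int) (rowspan : List (Int × Int × Int)) (out : Bool) : Prop := out = is_in_rowspan_py_alt y x rowspan
instance (y : Int) (x : Int) (rowspan : List (Int × Int × Int)) (out : Bool) : Decidable (Spec_is_in_rowspan_py y x rowspan out) := by unfold Spec_is_in_rowspan_py; infer_instance

-- ===== CLAIM (what is proved, stated in full; the proofs are below) =====
def Claim_equal_is_in_rowspan_py : Prop := ∀ (y : Int) (x : Int) (rowspan : List (Int × Int × Int)), Dom_is_in_rowspan_py y x rowspan → Spec_is_in_rowspan_py y x rowspan (is_in_rowspan_py y x rowspan)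

-- ===== LEMMAS AND PROOFS =====

-- the common characterisation: the entry of column x with maximal row index i, 0 ≤ i < y,
-- earliest occurrence winning ties (as a Python dict has no duplicate keys)
def bestSpec (y x : Int) : List (Int × Int × Int) → Option (Int × Int)
  | [] => none
  | e :: t =>
    let s := bestSpec y x t
    if e.2.1 = x ∧ 0 ≤ e.1 ∧ e.1 < y then
      match s with
      | none => some (e.1, e.2.2)
      | some p => if p.1 ≤ e.1 then some (e.1, e.2.2) else some p
    else s

theorem bestSpec_some {y x : Int} {l : List (Int × Int × Int)} {i v : Int}
    (h : bestSpec y x l = some (i, v)) :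
    0 ≤ i ∧ i < y ∧ pvLookup l i x = some v := by
  induction l with
  | nil => simp [bestSpec] at h
  | cons e t ih =>
    simp only [bestSpec] at h
    by_cases hc : e.2.1 = x ∧ 0 ≤ e.1 ∧ e.1 < y
    · simp only [if_pos hc] at h
      cases hs : bestSpec y x t with
      | none =>
        rw [hs] at h
        obtain ⟨h1, h2⟩ := Prod.mk.injEq .. ▸ (Option.some.injEq .. ▸ h)
        subst h1; subst h2
        exact ⟨hc.2.1, hc.2.2, by simp [pvLookup, hc.1]⟩
      | some p =>
        rw [hs] at h
        by_cases hle : p.1 ≤ e.1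
        · simp only [if_pos hle] at h
          obtain ⟨h1, h2⟩ := Prod.mk.injEq .. ▸ (Option.some.injEq .. ▸ h)
          subst h1; subst h2
          exact ⟨hc.2.1, hc.2.2, by simp [pvLookup, hc.1]⟩
        · simp only [if_neg hle] at h
          have h' : p = (i, v) := by exact Option.some.injEq .. ▸ h
          subst h'
          obtain ⟨hi0, hiy, hlk⟩ := ih hs
          refine ⟨hi0, hiy, ?_⟩
          have hne : ¬ (e.1 = i ∧ e.2.1 = x) := by
            rintro ⟨he, _⟩; exact hle (le_of_eq (he.symm ▸ rfl) |>.trans (le_refl i) |>.trans_eq he.symm)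
          simp [pvLookup, hne, hlk]
    · simp only [if_neg hc] at h
      obtain ⟨hi0, hiy, hlk⟩ := ih h
      refine ⟨hi0, hiy, ?_⟩
      have hne : ¬ (e.1 = i ∧ e.2.1 = x) := by
        rintro ⟨he, hx⟩; exact hc ⟨hx, he ▸ hi0, he ▸ hiy⟩
      simp [pvLookup, hne, hlk]

theorem bestSpec_none_of_nonpos {y x : Int} (hy : y ≤ 0) (l : List (Int × Int × Int)) :
    bestSpec y x l = none := by
  cases h : bestSpec y x l with
  | none => rfl
  | some p =>
    obtain ⟨h0, h1, _⟩ := bestSpec_some (by rw [h])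
    omega

-- extending the admitted row range by one
theorem bestSpec_succ {y : Int} (hy : 0 ≤ y) (x : Int) (l : List (Int × Int × Int)) :
    bestSpec (y + 1) x l =
      (match pvLookup l y x with
       | some v => some (y, v)
       | none => bestSpec y x l) := by
  induction l with
  | nil => simp [bestSpec, pvLookup]
  | cons e t ih =>
    by_cases hk : e.1 = y ∧ e.2.1 = x
    · have hc : e.2.1 = x ∧ 0 ≤ e.1 ∧ e.1 < y + 1 := ⟨hk.2, hk.1 ▸ hy, by omega⟩
      simp only [bestSpec, if_pos hc, pvLookup, if_pos hk]
      cases hs : bestSpec (y + 1) x t with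
      | none => simp [hk.1]
      | some p =>
        obtain ⟨_, hpy, _⟩ := bestSpec_some (by rw [hs])
        have hb1 : p.1 ≤ y := by omega
        have hb2 : ¬ y < p.1 := by omega
        simp [hk.1, hb1]
    · have hl : pvLookup (e :: t) y x = pvLookup t y x := by simp [pvLookup, hk]
      rw [hl]
      by_cases hc : e.2.1 = x ∧ 0 ≤ e.1 ∧ e.1 < y + 1
      · have hlt : e.1 < y := by
          rcases hc with ⟨hx, h0, h1⟩
          rcases lt_or_eq_of_le (by omega : e.1 ≤ y) with h | h
          · exact h
          · exact absurd ⟨h, hx⟩ hk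
        have hc' : e.2.1 = x ∧ 0 ≤ e.1 ∧ e.1 < y := ⟨hc.1, hc.2.1, hlt⟩
        simp only [bestSpec, if_pos hc, if_pos hc']
        cases hpv : pvLookup t y x with
        | some v =>
          rw [ih, hpv]
          have : ¬ ((y : Int) ≤ e.1) := by omega
          simp [this]
        | none => rw [ih, hpv]
      · simp only [bestSpec, if_neg hc]
        by_cases hc' : e.2.1 = x ∧ 0 ≤ e.1 ∧ e.1 < y
        · exact absurd ⟨hc'.1, hc'.2.1, by omega⟩ hc
        · simp only [if_neg hc']
          rw [ih]

-- A's loop computes (value, row) of bestSpec, with (0,0) when nothing matched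
def pvUnpack : Option (Int × Int) → Int × Int
  | none => (0, 0)
  | some p => (p.2, p.1)

theorem foldA_eq_bestSpec (x : Int) (l : List (Int × Int × Int)) : ∀ (n : Nat),
    (PySem.List.pyRange 0 n 1).foldl
      (fun (s : Int × Int) i =>
        match pvLookup l i x with
        | some v => (v, i)
        | none => s) (0, 0) = pvUnpack (bestSpec n x l) := by
  intro n
  induction n with
  | zero =>
    rw [PySem.List.pyRange_one_eq_nil (by norm_num)]
    rw [bestSpec_none_of_nonpos (by norm_num)]
    rfl
  | succ n ih =>
    have hcast : ((n + 1 : Nat) : Int) = (n : Int) + 1 := by push_cast; ring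
    rw [hcast, PySem.List.pyRange_one_succ_right (by positivity), List.foldl_append]
    rw [ih, bestSpec_succ (by positivity)]
    cases hpv : pvLookup l n x with
    | some v => simp [hpv, pvUnpack]
    | none => simp [hpv]

-- merging an earlier best (wins ties) with the best of the remaining entries
def pvMerge : Option (Int × Int) → Option (Int × Int) → Option (Int × Int)
  | b, none => b
  | none, some q => some q
  | some p, some q => if p.1 < q.1 then some q else some p

theorem foldB_eq_bestSpec (y x : Int) (l : List (Int × Int × Int)) :
    ∀ (b : Option (Int × Int)),
    l.foldl
      (fun (b : Option (Int × Int)) e =>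
        if decide (e.2.1 = x) && decide (0 ≤ e.1) && decide (e.1 < y)
            && b.all (fun p => decide (p.1 < e.1))
        then some (e.1, e.2.2) else b) b = pvMerge b (bestSpec y x l) := by
  induction l with
  | nil => intro b; cases b <;> rfl
  | cons e t ih =>
    intro b
    rw [List.foldl_cons, ih]
    by_cases hc : e.2.1 = x ∧ 0 ≤ e.1 ∧ e.1 < y
    · obtain ⟨h1, h2, h3⟩ := hc
      simp only [bestSpec, if_pos (⟨h1, h2, h3⟩ : e.2.1 = x ∧ 0 ≤ e.1 ∧ e.1 < y)]
      cases b <;> cases hs : bestSpec y x t <;>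
        simp [pvMerge, h1, h2, h3] <;>
        split_ifs <;> simp_all [pvMerge] <;>
        first
        | rfl
        | omega
        | (split_ifs <;> simp_all <;> omega)
    · have hstep : (if decide (e.2.1 = x) && decide (0 ≤ e.1) && decide (e.1 < y)
            && b.all (fun p => decide (p.1 < e.1))
          then some (e.1, e.2.2) else b) = b := by
        rw [if_neg]
        intro h
        simp only [Bool.and_eq_true, decide_eq_true_eq] at h
        exact hc ⟨h.1.1.1, h.1.1.2, h.1.2⟩
      rw [hstep]
      simp only [bestSpec, if_neg hc]

-- ===== VERDICT (by name: the statement is the Claim_ definition above) =====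
theorem is_in_rowspan_py_spec : Claim_equal_is_in_rowspan_py := by
  intro y x rowspan _
  unfold Spec_is_in_rowspan_py is_in_rowspan_py is_in_rowspan_py_alt
  rw [foldB_eq_bestSpec]
  have hA : (PySem.List.pyRange 0 y 1).foldl
      (fun (s : Int × Int) i =>
        match pvLookup rowspan i x with
        | some v => (v, i)
        | none => s) (0, 0) = pvUnpack (bestSpec y x rowspan) := by
    by_cases hy : y ≤ 0
    · rw [PySem.List.pyRange_one_eq_nil hy, bestSpec_none_of_nonpos hy]
      rfl
    · have : y = ((y.toNat : Nat) : Int) := by omega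
      rw [this]
      exact foldA_eq_bestSpec x rowspan y.toNat
  rw [hA]
  cases hs : bestSpec y x rowspan with
  | none => simp [pvUnpack, pvMerge]
  | some p => simp [pvUnpack, pvMerge]
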